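-- pv_equiv track=rewrite | github.com/blm34/AoC | src/solutions/2024/day6.py | get_jumps
-- ===== SOURCE A (Python) =====
-- DIRECTIONS = [(-1, 0),
--               (0, 1),
--               (1, 0),
--               (0, -1)]
--
-- def get_jumps(G) -> list[list[list[tuple[int, int]]]]:
--     R = len(G)
--     C = len(G[0])
--     jumps = [[[(None, None) for direction in range(4)] for c in range(C)] for r in range(R)]
--
--     for r in range(R):
--         for c in range(C):
--             for d in range(4):
--                 guard_r, guard_c = r, c
--                 while True:
--                     dr, dc = DIRECTIONS[d]
--                     if 0 <= guard_r + dr < R and 0 <= guard_c + dc < C: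
--                         if G[guard_r + dr][guard_c + dc] == '#':
--                             jumps[r][c][d] = (guard_r, guard_c)
--                             break
--                     else:
--                         jumps[r][c][d] = (guard_r + dr, guard_c + dc)
--                         break
--
--                     guard_r += dr
--                     guard_c += dc
--     return jumps
-- ===== SOURCE B (Python) =====
-- def get_jumps(G) -> list[list[list[tuple[int, int]]]]:
--     R = len(G)
--     C = len(G[0])
--
--     # up (direction 0): propagate from the row above, top to bottom
--     up = []
--     prev = []
--     for r in range(R):
--         if r == 0:
--             row = [(-1, c) for c in range(C)]
--         else:
--             row = [(r, c) if G[r - 1][c] == '#' else prev[c] for c in range(C)]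
--         up.append(row)
--         prev = row
--
--     # down (direction 2): propagate from the row below, bottom to top
--     down_rev = []
--     prev = []
--     for k in range(R):
--         r = R - 1 - k
--         if k == 0:
--             row = [(R, c) for c in range(C)]
--         else:
--             row = [(r, c) if G[r + 1][c] == '#' else prev[c] for c in range(C)]
--         down_rev.append(row)
--         prev = row
--     down = down_rev[::-1]
--
--     # left (3) and right (1): one scan per row in each horizontal direction
--     left = []
--     right = []
--     for r in range(R):
--         lrow = []
--         v = None
--         for c in range(C):
--             if c == 0:
--                 v = (r, -1)
--             elif G[r][c - 1] == '#':
--                 v = (r, c)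
--             lrow.append(v)
--         rrow_rev = []
--         v = None
--         for k in range(C):
--             c = C - 1 - k
--             if k == 0:
--                 v = (r, C)
--             elif G[r][c + 1] == '#':
--                 v = (r, c)
--             rrow_rev.append(v)
--         left.append(lrow)
--         right.append(rrow_rev[::-1])
--
--     return [[[up[r][c], right[r][c], down[r][c], left[r][c]]
--              for c in range(C)] for r in range(R)]
-- ===== Notes on version B (the rewrite author's own statement) =====
-- stated objective: faster
-- what changed: Replaces A's per-cell walk along each direction (re-scanning until a wall or the border) with four dynamic-programming sweeps that propagate each cell's stop position from its neighbour in that direction, one pass per direction.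
import Mathlib
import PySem

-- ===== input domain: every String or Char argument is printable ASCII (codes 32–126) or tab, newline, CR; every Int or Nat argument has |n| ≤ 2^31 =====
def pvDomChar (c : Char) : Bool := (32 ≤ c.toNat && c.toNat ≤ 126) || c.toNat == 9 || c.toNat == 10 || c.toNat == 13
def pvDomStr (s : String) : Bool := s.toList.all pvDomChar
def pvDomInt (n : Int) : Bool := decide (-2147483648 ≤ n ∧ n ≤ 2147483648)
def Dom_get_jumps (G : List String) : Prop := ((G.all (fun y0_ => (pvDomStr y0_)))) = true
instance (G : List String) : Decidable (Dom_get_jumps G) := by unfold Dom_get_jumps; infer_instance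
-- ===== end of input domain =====

-- B replaces A's per-cell directional walks by four O(R*C) DP sweeps propagating each
-- cell's stop position from its neighbour in that direction (asymptotically faster).

-- ===== PORT A =====
-- G[r][c] as Python reads it; exact whenever 0 ≤ r < len(G) and 0 ≤ c < len(G[r]),
-- which the bounds guards plus Pre_ guarantee at every read.
def pvCharAt (G : List String) (r c : Int) : Char :=
  ((G.getD r.toNat "").toList).getD c.toNat ' '

def pvDIRECTIONS : List (Int × Int) := [(-1, 0), (0, 1), (1, 0), (0, -1)]

-- the 'while True' loop of A; fuel R+C+2 always suffices (the walk moves monotonically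
-- toward a border), so the fuel-0 branch is never reached on the ports' calls
def pvWalkA (G : List String) (R C : Int) (d : Nat) : Int → Int → Nat → Int × Int
  | gr, gc, 0 => (gr, gc)
  | gr, gc, fuel+1 =>
      let dir := pvDIRECTIONS.getD d (0, 0)
      if 0 ≤ gr + dir.1 ∧ gr + dir.1 < R ∧ 0 ≤ gc + dir.2 ∧ gc + dir.2 < C then
        if pvCharAt G (gr + dir.1) (gc + dir.2) = '#' then (gr, gc)
        else pvWalkA G R C d (gr + dir.1) (gc + dir.2) fuel
      else (gr + dir.1, gc + dir.2)

def get_jumps (G : List String) : List (List (List (Int × Int))) :=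
  let R := G.length
  let C := (G.getD 0 "").length
  (List.range R).map fun (r : Nat) => (List.range C).map fun (c : Nat) =>
    (List.range 4).map fun d =>
      pvWalkA G (R : Int) (C : Int) d (r : Int) (c : Int) (R + C + 2)

-- ===== PORT B =====
-- up sweep: rows top to bottom, each row computed from the previous row 'prev'
def pvUpGo (G : List String) (C : Nat) : Nat → List (Int × Int) → Nat → List (List (Int × Int))
  | _, _, 0 => []
  | r, prev, n+1 =>
      let row := (List.range C).map fun (c : Nat) =>
        if r = 0 then ((-1 : Int), (c : Int))
        else if pvCharAt G ((r : Int) - 1) (c : Int) = '#' then ((r : Int), (c : Int))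
        else prev.getD c (0, 0)
      row :: pvUpGo G C (r+1) row n

-- down sweep: rows bottom to top (k counts from the bottom), reversed afterwards
def pvDownGo (G : List String) (R C : Nat) : Nat → List (Int × Int) → Nat → List (List (Int × Int))
  | _, _, 0 => []
  | k, prev, n+1 =>
      let r := R - 1 - k
      let row := (List.range C).map fun (c : Nat) =>
        if k = 0 then ((R : Int), (c : Int))
        else if pvCharAt G ((r : Int) + 1) (c : Int) = '#' then ((r : Int), (c : Int))
        else prev.getD c (0, 0)
      row :: pvDownGo G R C (k+1) row n

-- left sweep within a row: columns left to right, carrying the previous value v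
def pvLeftGo (G : List String) (r : Nat) : Nat → (Int × Int) → Nat → List (Int × Int)
  | _, _, 0 => []
  | c, v, n+1 =>
      let v' := if c = 0 then ((r : Int), (-1 : Int))
        else if pvCharAt G (r : Int) ((c : Int) - 1) = '#' then ((r : Int), (c : Int))
        else v
      v' :: pvLeftGo G r (c+1) v' n

-- right sweep within a row: columns right to left (k from the right), reversed afterwards
def pvRightGo (G : List String) (r C : Nat) : Nat → (Int × Int) → Nat → List (Int × Int)
  | _, _, 0 => []
  | k, v, n+1 =>
      let c := C - 1 - k
      let v' := if k = 0 then ((r : Int), (C : Int))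
        else if pvCharAt G (r : Int) ((c : Int) + 1) = '#' then ((r : Int), (c : Int))
        else v
      v' :: pvRightGo G r C (k+1) v' n

def get_jumps_alt (G : List String) : List (List (List (Int × Int))) :=
  let R := G.length
  let C := (G.getD 0 "").length
  let up := pvUpGo G C 0 [] R
  let down := (pvDownGo G R C 0 [] R).reverse
  let left := (List.range R).map fun r => pvLeftGo G r 0 (0, 0) C
  let right := (List.range R).map fun r => (pvRightGo G r C 0 (0, 0) C).reverse
  (List.range R).map fun (r : Nat) => (List.range C).map fun (c : Nat) =>
    [((up.getD r []).getD c (0, 0)), ((right.getD r []).getD c (0, 0)),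
     ((down.getD r []).getD c (0, 0)), ((left.getD r []).getD c (0, 0))]

-- ===== PRECONDITION & SPEC =====
-- Pre_ excludes exactly the inputs on which Python A raises IndexError: the empty grid
-- (len(G[0])) and grids where some row is shorter than row 0 (the walk reads G[rr][cc]
-- for every in-grid cell, so a short row is always reached unless there is only one row,
-- in which case no other row exists).
def Pre_get_jumps (G : List String) : Prop :=
  G ≠ [] ∧ ∀ s ∈ G, (G.getD 0 "").length ≤ s.length
instance (G : List String) : Decidable (Pre_get_jumps G) := by unfold Pre_get_jumps; infer_instance

def pvWitness_get_jumps : List String := ["..#", ".#.", "..."]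

def Spec_get_jumps (G : List String) (out : List (List (List (Int × Int)))) : Prop := out = get_jumps_alt G
instance (G : List String) (out : List (List (List (Int × Int)))) : Decidable (Spec_get_jumps G out) := by unfold Spec_get_jumps; infer_instance

-- ===== CLAIM (what is proved, stated in full; the proofs are below) =====
def Claim_equal_get_jumps : Prop := ∀ (G : List String), Dom_get_jumps G → Pre_get_jumps G → Spec_get_jumps G (get_jumps G)

-- ===== LEMMAS AND PROOFS =====

-- the common stop function per direction, recursing on the distance to the border
def sUp (G : List String) (c : Nat) : Nat → Int × Int
  | 0 => (-1, (c : Int))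
  | r+1 => if pvCharAt G (r : Int) (c : Int) = '#' then (((r+1 : Nat) : Int), (c : Int)) else sUp G c r

def sDown (G : List String) (R c : Nat) : Nat → Int × Int
  | 0 => ((R : Int), (c : Int))
  | k+1 =>
      let r := R - 1 - (k+1)
      if pvCharAt G ((r : Int) + 1) (c : Int) = '#' then ((r : Int), (c : Int)) else sDown G R c k

def sLeft (G : List String) (r : Nat) : Nat → Int × Int
  | 0 => ((r : Int), (-1 : Int))
  | c+1 => if pvCharAt G (r : Int) (c : Int) = '#' then ((r : Int), ((c+1 : Nat) : Int)) else sLeft G r c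

def sRight (G : List String) (r C : Nat) : Nat → Int × Int
  | 0 => ((r : Int), (C : Int))
  | k+1 =>
      let c := C - 1 - (k+1)
      if pvCharAt G (r : Int) ((c : Int) + 1) = '#' then ((r : Int), (c : Int)) else sRight G r C k

lemma getD_map_range {α : Type} (f : Nat → α) (C c : Nat) (hc : c < C) (d : α) :
    ((List.range C).map f).getD c d = f c := by
  simp [List.getD_eq_getElem?_getD, hc]

lemma getD_reverse_map_range {α : Type} (f : Nat → α) (n i : Nat) (hi : i < n) (d : α) :
    (((List.range n).map f).reverse).getD i d = f (n - 1 - i) := by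
  have hlen : (((List.range n).map f).reverse).length = n := by simp
  have hi' : i < (((List.range n).map f).reverse).length := by omega
  rw [List.getD_eq_getElem?_getD, List.getElem?_eq_getElem hi']
  simp [List.getElem_reverse]

lemma walkA_up (G : List String) (R C : Nat) (c : Nat) (hc : c < C) :
    ∀ (r fuel : Nat), r < R → r + 1 ≤ fuel →
      pvWalkA G (R : Int) (C : Int) 0 (r : Int) (c : Int) fuel = sUp G c r := by
  intro r
  induction r with
  | zero =>
    intro fuel _ hfuel
    obtain ⟨f, rfl⟩ : ∃ f, fuel = f + 1 := ⟨fuel - 1, by omega⟩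
    rw [pvWalkA]
    simp only [pvDIRECTIONS, List.getD_cons_zero]
    rw [if_neg (by omega)]
    simp [sUp]
  | succ s ih =>
    intro fuel hr hfuel
    obtain ⟨f, rfl⟩ : ∃ f, fuel = f + 1 := ⟨fuel - 1, by omega⟩
    rw [pvWalkA]
    simp only [pvDIRECTIONS, List.getD_cons_zero]
    have e1 : ((s + 1 : Nat) : Int) + -1 = (s : Int) := by push_cast; ring
    have e2 : ((c : Nat) : Int) + 0 = (c : Int) := by ring
    rw [e1, e2, if_pos (by omega)]
    by_cases hch : pvCharAt G (s : Int) (c : Int) = '#'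
    · simp [sUp, hch]
    · rw [if_neg hch, ih f (by omega) (by omega)]
      simp [sUp, hch]
lemma walkA_down (G : List String) (R C : Nat) (c : Nat) (hc : c < C) :
    ∀ (k r fuel : Nat), r < R → k = R - 1 - r → k + 1 ≤ fuel →
      pvWalkA G (R : Int) (C : Int) 2 (r : Int) (c : Int) fuel = sDown G R c k := by
  intro k
  induction k with
  | zero =>
    intro r fuel hr hk hfuel
    obtain ⟨f, rfl⟩ : ∃ f, fuel = f + 1 := ⟨fuel - 1, by omega⟩
    rw [pvWalkA]
    simp only [pvDIRECTIONS, List.getD_cons_zero, List.getD_cons_succ]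
    rw [if_neg (by omega)]
    simp only [sDown, Prod.mk.injEq]
    constructor <;> omega
  | succ t ih =>
    intro r fuel hr hk hfuel
    obtain ⟨f, rfl⟩ : ∃ f, fuel = f + 1 := ⟨fuel - 1, by omega⟩
    rw [pvWalkA]
    simp only [pvDIRECTIONS, List.getD_cons_zero, List.getD_cons_succ]
    have e2 : ((c : Nat) : Int) + 0 = (c : Int) := by ring
    have er : (R - 1 - (t + 1) : Nat) = r := by omega
    rw [if_pos (by omega), e2]
    simp only [sDown, er]
    by_cases hch : pvCharAt G ((r : Int) + 1) (c : Int) = '#'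
    · rw [if_pos hch, if_pos hch]
    · rw [if_neg hch, if_neg hch]
      have e3 : ((r : Nat) : Int) + 1 = ((r + 1 : Nat) : Int) := by push_cast; ring
      rw [e3, ih (r + 1) f (by omega) (by omega) (by omega)]
lemma walkA_left (G : List String) (R C : Nat) (r : Nat) (hr : r < R) :
    ∀ (c fuel : Nat), c < C → c + 1 ≤ fuel →
      pvWalkA G (R : Int) (C : Int) 3 (r : Int) (c : Int) fuel = sLeft G r c := by
  intro c
  induction c with
  | zero =>
    intro fuel _ hfuel
    obtain ⟨f, rfl⟩ : ∃ f, fuel = f + 1 := ⟨fuel - 1, by omega⟩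
    rw [pvWalkA]
    simp only [pvDIRECTIONS, List.getD_cons_zero, List.getD_cons_succ]
    rw [if_neg (by omega)]
    simp [sLeft]
  | succ s ih =>
    intro fuel hcC hfuel
    obtain ⟨f, rfl⟩ : ∃ f, fuel = f + 1 := ⟨fuel - 1, by omega⟩
    rw [pvWalkA]
    simp only [pvDIRECTIONS, List.getD_cons_zero, List.getD_cons_succ]
    have e1 : ((r : Nat) : Int) + 0 = (r : Int) := by ring
    have e2 : ((s + 1 : Nat) : Int) + -1 = (s : Int) := by push_cast; ring
    rw [if_pos (by omega), e1, e2]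
    by_cases hch : pvCharAt G (r : Int) (s : Int) = '#'
    · simp [sLeft, hch]
    · rw [if_neg hch, ih f (by omega) (by omega)]
      simp [sLeft, hch]
lemma walkA_right (G : List String) (R C : Nat) (r : Nat) (hr : r < R) :
    ∀ (k c fuel : Nat), c < C → k = C - 1 - c → k + 1 ≤ fuel →
      pvWalkA G (R : Int) (C : Int) 1 (r : Int) (c : Int) fuel = sRight G r C k := by
  intro k
  induction k with
  | zero =>
    intro c fuel hcC hk hfuel
    obtain ⟨f, rfl⟩ : ∃ f, fuel = f + 1 := ⟨fuel - 1, by omega⟩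
    rw [pvWalkA]
    simp only [pvDIRECTIONS, List.getD_cons_zero, List.getD_cons_succ]
    rw [if_neg (by omega)]
    simp only [sRight, Prod.mk.injEq]
    constructor <;> omega
  | succ t ih =>
    intro c fuel hcC hk hfuel
    obtain ⟨f, rfl⟩ : ∃ f, fuel = f + 1 := ⟨fuel - 1, by omega⟩
    rw [pvWalkA]
    simp only [pvDIRECTIONS, List.getD_cons_zero, List.getD_cons_succ]
    have e1 : ((r : Nat) : Int) + 0 = (r : Int) := by ring
    have ec : (C - 1 - (t + 1) : Nat) = c := by omega
    rw [if_pos (by omega), e1]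
    simp only [sRight, ec]
    by_cases hch : pvCharAt G (r : Int) ((c : Int) + 1) = '#'
    · rw [if_pos hch, if_pos hch]
    · rw [if_neg hch, if_neg hch]
      have e3 : ((c : Nat) : Int) + 1 = ((c + 1 : Nat) : Int) := by push_cast; ring
      rw [e3, ih (c + 1) f (by omega) (by omega) (by omega)]
lemma upGo_eq (G : List String) (C : Nat) :
    ∀ (n r : Nat) (prev : List (Int × Int)),
      (r = 0 ∨ prev = (List.range C).map (fun c => sUp G c (r - 1))) →
      pvUpGo G C r prev n
        = (List.range n).map (fun i => (List.range C).map (fun c => sUp G c (r + i))) := by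
  intro n
  induction n with
  | zero => intro r prev _; simp [pvUpGo]
  | succ m ih =>
    intro r prev hprev
    rw [pvUpGo]
    have hrow : ((List.range C).map fun (c : Nat) =>
          if r = 0 then ((-1 : Int), (c : Int))
          else if pvCharAt G ((r : Int) - 1) (c : Int) = '#' then ((r : Int), (c : Int))
          else prev.getD c (0, 0))
        = (List.range C).map (fun c => sUp G c r) := by
      apply List.map_congr_left
      intro c hcmem
      have hc : c < C := List.mem_range.mp hcmem
      cases r with
      | zero => simp [sUp]
      | succ s =>
        have hp : prev = (List.range C).map (fun c => sUp G c s) := by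
          rcases hprev with h | h
          · exact absurd h (Nat.succ_ne_zero s)
          · simpa using h
        have e1 : ((s + 1 : Nat) : Int) - 1 = (s : Int) := by push_cast; ring
        rw [if_neg (Nat.succ_ne_zero s), e1]
        by_cases hch : pvCharAt G (s : Int) (c : Int) = '#'
        · simp [sUp, hch]
        · rw [if_neg hch, hp, getD_map_range _ _ _ hc]
          simp [sUp, hch]
    rw [hrow, ih (r + 1) _ (Or.inr (by simp))]
    rw [List.range_succ_eq_map, List.map_cons, List.map_map]
    congr 1
    apply List.map_congr_left
    intro i _
    simp only [Function.comp_apply]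
    apply List.map_congr_left
    intro c _
    congr 1
    omega
lemma downGo_eq (G : List String) (R C : Nat) :
    ∀ (n k : Nat) (prev : List (Int × Int)),
      (k = 0 ∨ prev = (List.range C).map (fun c => sDown G R c (k - 1))) →
      pvDownGo G R C k prev n
        = (List.range n).map (fun i => (List.range C).map (fun c => sDown G R c (k + i))) := by
  intro n
  induction n with
  | zero => intro k prev _; simp [pvDownGo]
  | succ m ih =>
    intro k prev hprev
    rw [pvDownGo]
    have hrow : ((List.range C).map fun (c : Nat) =>
          if k = 0 then ((R : Int), (c : Int))
          else if pvCharAt G (((R - 1 - k : Nat) : Int) + 1) (c : Int) = '#' then (((R - 1 - k : Nat) : Int), (c : Int))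
          else prev.getD c (0, 0))
        = (List.range C).map (fun c => sDown G R c k) := by
      apply List.map_congr_left
      intro c hcmem
      have hc : c < C := List.mem_range.mp hcmem
      cases k with
      | zero => simp [sDown]
      | succ t =>
        have hp : prev = (List.range C).map (fun c => sDown G R c t) := by
          rcases hprev with h | h
          · exact absurd h (Nat.succ_ne_zero t)
          · simpa using h
        rw [if_neg (Nat.succ_ne_zero t)]
        by_cases hch : pvCharAt G (((R - 1 - (t + 1) : Nat) : Int) + 1) (c : Int) = '#'
        · rw [if_pos hch]
          simp only [sDown]
          rw [if_pos hch]
        · rw [if_neg hch, hp, getD_map_range _ _ _ hc]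
          simp only [sDown]
          rw [if_neg hch]
    rw [hrow, ih (k + 1) _ (Or.inr (by simp))]
    rw [List.range_succ_eq_map, List.map_cons, List.map_map]
    congr 1
    apply List.map_congr_left
    intro i _
    simp only [Function.comp_apply]
    apply List.map_congr_left
    intro c _
    congr 1
    omega
lemma leftGo_eq (G : List String) (r : Nat) :
    ∀ (n c : Nat) (v : Int × Int),
      (c = 0 ∨ v = sLeft G r (c - 1)) →
      pvLeftGo G r c v n = (List.range n).map (fun i => sLeft G r (c + i)) := by
  intro n
  induction n with
  | zero => intro c v _; simp [pvLeftGo]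
  | succ m ih =>
    intro c v hv
    rw [pvLeftGo]
    have hv' : (if c = 0 then ((r : Int), (-1 : Int))
        else if pvCharAt G (r : Int) ((c : Int) - 1) = '#' then ((r : Int), (c : Int))
        else v) = sLeft G r c := by
      cases c with
      | zero => simp [sLeft]
      | succ s =>
        have hp : v = sLeft G r s := by
          rcases hv with h | h
          · exact absurd h (Nat.succ_ne_zero s)
          · simpa using h
        have e1 : ((s + 1 : Nat) : Int) - 1 = (s : Int) := by push_cast; ring
        rw [if_neg (Nat.succ_ne_zero s), e1]
        by_cases hch : pvCharAt G (r : Int) (s : Int) = '#'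
        · simp [sLeft, hch]
        · rw [if_neg hch, hp]
          simp [sLeft, hch]
    rw [hv', ih (c + 1) _ (Or.inr (by simp))]
    rw [List.range_succ_eq_map, List.map_cons, List.map_map]
    congr 1
    apply List.map_congr_left
    intro i _
    simp only [Function.comp_apply]
    congr 1
    omega
lemma rightGo_eq (G : List String) (r C : Nat) :
    ∀ (n k : Nat) (v : Int × Int),
      (k = 0 ∨ v = sRight G r C (k - 1)) →
      pvRightGo G r C k v n = (List.range n).map (fun i => sRight G r C (k + i)) := by
  intro n
  induction n with
  | zero => intro k v _; simp [pvRightGo]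
  | succ m ih =>
    intro k v hv
    rw [pvRightGo]
    have hv' : (if k = 0 then ((r : Int), (C : Int))
        else if pvCharAt G (r : Int) (((C - 1 - k : Nat) : Int) + 1) = '#' then (((r : Nat) : Int), ((C - 1 - k : Nat) : Int))
        else v) = sRight G r C k := by
      cases k with
      | zero => simp [sRight]
      | succ t =>
        have hp : v = sRight G r C t := by
          rcases hv with h | h
          · exact absurd h (Nat.succ_ne_zero t)
          · simpa using h
        rw [if_neg (Nat.succ_ne_zero t)]
        by_cases hch : pvCharAt G (r : Int) (((C - 1 - (t + 1) : Nat) : Int) + 1) = '#'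
        · rw [if_pos hch]
          simp only [sRight]
          rw [if_pos hch]
        · rw [if_neg hch, hp]
          simp only [sRight]
          rw [if_neg hch]
    rw [hv', ih (k + 1) _ (Or.inr (by simp))]
    rw [List.range_succ_eq_map, List.map_cons, List.map_map]
    congr 1
    apply List.map_congr_left
    intro i _
    simp only [Function.comp_apply]
    congr 1
    omega

-- ===== VERDICT (by name: the statement is the Claim_ definition above) =====
theorem get_jumps_spec : Claim_equal_get_jumps := by
  intro G _ _
  show get_jumps G = get_jumps_alt G
  simp only [get_jumps, get_jumps_alt]
  apply List.map_congr_left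
  intro r hrmem
  have hr : r < G.length := List.mem_range.mp hrmem
  apply List.map_congr_left
  intro c hcmem
  have hc : c < (G.getD 0 "").length := List.mem_range.mp hcmem
  have h4 : List.range 4 = [0, 1, 2, 3] := rfl
  rw [h4]
  simp only [List.map_cons, List.map_nil]
  have hu : ((pvUpGo G (G.getD 0 "").length 0 [] G.length).getD r []).getD c (0, 0)
      = sUp G c r := by
    rw [upGo_eq G _ _ 0 [] (Or.inl rfl), getD_map_range _ _ _ hr, getD_map_range _ _ _ hc]
    simp
  have hd : (((pvDownGo G G.length (G.getD 0 "").length 0 [] G.length).reverse.getD r []).getD c (0, 0))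
      = sDown G G.length c (G.length - 1 - r) := by
    rw [downGo_eq G _ _ _ 0 [] (Or.inl rfl), getD_reverse_map_range _ _ _ hr, getD_map_range _ _ _ hc]
    simp
  have hl : ((((List.range G.length).map fun r => pvLeftGo G r 0 (0, 0) (G.getD 0 "").length).getD r []).getD c (0, 0))
      = sLeft G r c := by
    rw [getD_map_range _ _ _ hr, leftGo_eq G r _ 0 (0, 0) (Or.inl rfl), getD_map_range _ _ _ hc]
    simp
  have hri : ((((List.range G.length).map fun r => (pvRightGo G r (G.getD 0 "").length 0 (0, 0) (G.getD 0 "").length).reverse).getD r []).getD c (0, 0))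
      = sRight G r (G.getD 0 "").length ((G.getD 0 "").length - 1 - c) := by
    rw [getD_map_range _ _ _ hr, rightGo_eq G r _ _ 0 (0, 0) (Or.inl rfl), getD_reverse_map_range _ _ _ hc]
    simp
  rw [hu, hd, hl, hri,
    walkA_up G _ _ c hc r _ hr (by omega),
    walkA_down G _ _ c hc (G.length - 1 - r) r _ hr rfl (by omega),
    walkA_left G _ _ r hr c _ hc (by omega),
    walkA_right G _ _ r hr ((G.getD 0 "").length - 1 - c) c _ hc rfl (by omega)]
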